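-- pv_equiv track=rewrite | github.com/Lama1421f/python-lab | Untitled19 (2).py | term_document_incidence_matrix
-- ===== SOURCE A (Python) =====
-- boolean_operators = {'AND', 'OR', 'NOT'}
--
-- def get_terms (data):
--     terms=[]
--     for doc in data:
--         for term in data[doc].split() :
--             terms.append(term)
--     return terms
--
-- def get_unique_terms(terms):
--     unique_terms=[]
--     for d in terms :
--         if d not in unique_terms:
--             unique_terms.append(d)
--     return unique_terms
--
-- def get_document_collection_terms(data):
--     docs_colllection={}
--     for doc in data:
--         if doc not in boolean_operators :
--             docs_colllection[doc]=get_unique_terms(data[doc].split())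
--     return docs_colllection
--
-- def term_document_incidence_matrix(collection2):
-- ## list of terms from the data file collection
--     terms = get_terms(collection2)
-- #list of unique terms
--     uique_terms = get_unique_terms(terms)
-- #Document collection terms
--     docs_terms=get_document_collection_terms(collection2)
-- #TermDocumentIncidenceMatrix
--     term_docs_matrix= { }
--     for term in uique_terms :
--         vector=[]
--         for c in docs_terms:
--             if term in docs_terms[c]:
--                 vector.append(1)
--             else :
--                 vector.append(0)
--         term_docs_matrix[term]=vector
--     return term_docs_matrix
-- ===== SOURCE B (Python) =====
-- boolean_operators = {'AND', 'OR', 'NOT'}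
--
-- def term_document_incidence_matrix(collection2):
--     # one scatter pass over token occurrences instead of the nested term x doc gather
--     docs = [doc for doc in collection2 if doc not in boolean_operators]
--     pos = {doc: i for i, doc in enumerate(docs)}
--     n = len(docs)
--     matrix = {}
--     for doc, text in collection2.items():
--         col = pos.get(doc)
--         for tok in text.split():
--             if tok not in matrix:
--                 matrix[tok] = [0] * n
--             if col is not None:
--                 matrix[tok][col] = 1
--     return matrix
-- ===== Notes on version B (the rewrite author's own statement) =====
-- stated objective: faster
-- what changed: Replaces the nested gather (for every unique term, scan every non-boolean document's deduplicated term list) by a single scatter pass: precompute the column index of each non-boolean document, initialize each term's row to zeros on first sight, and set matrix[tok][col]=1 for every token occurrence.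
import Mathlib
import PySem

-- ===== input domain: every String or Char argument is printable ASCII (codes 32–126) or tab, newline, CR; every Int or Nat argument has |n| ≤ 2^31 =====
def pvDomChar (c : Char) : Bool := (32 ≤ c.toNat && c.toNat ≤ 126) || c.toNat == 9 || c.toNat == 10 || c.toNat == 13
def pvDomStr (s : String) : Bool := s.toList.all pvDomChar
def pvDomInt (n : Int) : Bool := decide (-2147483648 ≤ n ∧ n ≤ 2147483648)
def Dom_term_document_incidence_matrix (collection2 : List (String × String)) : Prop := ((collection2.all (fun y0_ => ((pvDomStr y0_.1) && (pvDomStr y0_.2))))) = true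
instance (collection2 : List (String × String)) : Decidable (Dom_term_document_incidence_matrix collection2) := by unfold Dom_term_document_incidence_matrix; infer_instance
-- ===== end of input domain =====

-- B replaces A's nested gather (every unique term scans every non-boolean document's
-- deduplicated term list) by one scatter pass over token occurrences; return values only
-- are compared (neither version mutates its argument).

-- boolean_operators = {'AND', 'OR', 'NOT'} (used for membership tests only)
def pvBoolOps : PySem.Set String := PySem.Set.ofList ["AND", "OR", "NOT"]

-- ===== PORT A =====
-- 'for doc in data: … data[doc] …' iterates the dict's keys in insertion order;
-- we fold over data.items and look the key up with getD, exactly Python's data[doc]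
-- (the key is present, so the lookup cannot raise).
def pvGetTerms (data : PySem.Dict String String) : List String :=
  data.items.foldl (fun terms kv => terms ++ PySem.Str.split₀ (data.getD kv.1 "")) []

def pvGetUniqueTerms (terms : List String) : List String :=
  terms.foldl (fun u d => if u.contains d then u else u ++ [d]) []

def pvGetDocCollectionTerms (data : PySem.Dict String String) : PySem.Dict String (List String) :=
  data.items.foldl (fun dc kv =>
    if pvBoolOps.contains kv.1 then dc
    else dc.insert kv.1 (pvGetUniqueTerms (PySem.Str.split₀ (data.getD kv.1 "")))) PySem.Dict.empty

def term_document_incidence_matrix (collection2 : List (String × String)) : List (String × List Int) :=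
  let data := PySem.Dict.ofList collection2
  let terms := pvGetTerms data
  let uniqueTerms := pvGetUniqueTerms terms
  let docsTerms := pvGetDocCollectionTerms data
  let m := uniqueTerms.foldl (fun m term =>
      m.insert term (docsTerms.items.foldl (fun vector c =>
        if (docsTerms.getD c.1 []).contains term then vector ++ [(1 : Int)]
        else vector ++ [(0 : Int)]) [])) PySem.Dict.empty
  m.items

-- ===== PORT B =====
-- inner loop body: ensure the row exists, then (if the doc has a column) set that cell;
-- 'matrix[tok][col] = 1' re-stores the row with the cell set (exact: the key is present).
def pvScatterTok (n : Nat) (col : Option Int) (m : PySem.Dict String (List Int))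
    (tok : String) : PySem.Dict String (List Int) :=
  let m' := if m.contains tok then m else m.insert tok (List.replicate n (0 : Int))
  match col with
  | some c => m'.insert tok (PySem.List.pySetD (m'.getD tok []) c 1)
  | none => m'

def pvScatterDoc (n : Nat) (pos : PySem.Dict String Int)
    (m : PySem.Dict String (List Int)) (kv : String × String) : PySem.Dict String (List Int) :=
  let col := pos.get? kv.1
  (PySem.Str.split₀ kv.2).foldl (pvScatterTok n col) m

def term_document_incidence_matrix_alt (collection2 : List (String × String)) : List (String × List Int) :=
  let data := PySem.Dict.ofList collection2
  let docs := data.keys.foldl (fun acc doc => if pvBoolOps.contains doc then acc else acc ++ [doc]) []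
  let pos := (PySem.List.enumerate docs).foldl (fun d q => d.insert q.2 q.1)
      (PySem.Dict.empty : PySem.Dict String Int)
  let n := docs.length
  let matrix := data.items.foldl (pvScatterDoc n pos) PySem.Dict.empty
  matrix.items

-- ===== PRECONDITION & SPEC =====
def Spec_term_document_incidence_matrix (collection2 : List (String × String)) (out : List (String × List Int)) : Prop := out = term_document_incidence_matrix_alt collection2
instance (collection2 : List (String × String)) (out : List (String × List Int)) : Decidable (Spec_term_document_incidence_matrix collection2 out) := by unfold Spec_term_document_incidence_matrix; infer_instance

-- ===== CLAIM (what is proved, stated in full; the proofs are below) =====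
def Claim_equal_term_document_incidence_matrix : Prop := ∀ (collection2 : List (String × String)), Dom_term_document_incidence_matrix collection2 → Spec_term_document_incidence_matrix collection2 (term_document_incidence_matrix collection2)

-- ===== LEMMAS AND PROOFS =====

-- the non-boolean-key test, the token stream and the incidence row of a document list
def pvP (kv : String × String) : Bool := !(pvBoolOps.contains kv.1)

def pvTerms (l : List (String × String)) : List String :=
  l.flatMap (fun kv => PySem.Str.split₀ kv.2)

def pvRow (l : List (String × String)) (t : String) : List Int :=
  (l.filter pvP).map (fun kv => if (PySem.Str.split₀ kv.2).contains t then 1 else 0)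

-- the common canonical value both ports compute
def pvCanon (l : List (String × String)) : List (String × List Int) :=
  (PySem.Set.ofList (pvTerms l)).map (fun t => (t, pvRow l t))

lemma pvUnique_eq_ofList (ts : List String) : pvGetUniqueTerms ts = PySem.Set.ofList ts := by
  rw [PySem.Set.ofList_eq_foldl]; rfl

lemma pvGetTerms_eq (data : PySem.Dict String String) (hk : data.keys.Nodup) :
    pvGetTerms data = pvTerms data.items := by
  unfold pvGetTerms pvTerms
  rw [PySem.List.foldl_congr_mem _ _ (fun terms kv => terms ++ PySem.Str.split₀ kv.2) _
        (fun acc kv hkv => by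
          rw [PySem.Dict.getD_of_mem_items data (k := kv.1) (v := kv.2) (by simpa using hkv) hk]),
      PySem.List.foldl_append_eq_flatMap]
  simp

lemma pvDocsTerms_items (data : PySem.Dict String String) (hk : data.keys.Nodup) :
    (pvGetDocCollectionTerms data).items
      = (data.items.filter pvP).map (fun kv => (kv.1, PySem.Set.ofList (PySem.Str.split₀ kv.2))) := by
  unfold pvGetDocCollectionTerms
  have hbody : (fun (dc : PySem.Dict String (List String)) (kv : String × String) =>
        if pvBoolOps.contains kv.1 then dc
        else dc.insert kv.1 (pvGetUniqueTerms (PySem.Str.split₀ (data.getD kv.1 ""))))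
      = (fun dc kv => if pvP kv then
          dc.insert kv.1 (pvGetUniqueTerms (PySem.Str.split₀ (data.getD kv.1 ""))) else dc) := by
    funext dc kv; unfold pvP; cases pvBoolOps.contains kv.1 <;> simp
  rw [hbody, ← List.foldl_filter,
      PySem.Dict.items_foldl_insert_fresh _ Prod.fst _ _
        (fun kv _ => PySem.Dict.contains_empty _)
        (by
          have : (List.filter pvP data.items).map Prod.fst
              = data.keys.filter (fun d => !(pvBoolOps.contains d)) := by
            simp only [PySem.Dict.keys]
            exact (List.filter_map (f := Prod.fst)
              (p := fun d => !(pvBoolOps.contains d)) (l := data.items)).symm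
          rw [this]; exact hk.filter _)]
  simp only [show (PySem.Dict.empty : PySem.Dict String (List String)).items = [] from rfl, List.nil_append]
  refine List.map_congr_left (fun kv hkv => ?_)
  have hmem : (kv.1, kv.2) ∈ data.items := by simpa using List.mem_of_mem_filter hkv
  rw [PySem.Dict.getD_of_mem_items data hmem hk, pvUnique_eq_ofList]

lemma pvDocsTerms_keys_nodup (data : PySem.Dict String String) (hk : data.keys.Nodup) :
    (pvGetDocCollectionTerms data).keys.Nodup := by
  simp only [PySem.Dict.keys, pvDocsTerms_items data hk, List.map_map]
  have h : (List.filter pvP data.items).map (Prod.fst ∘ fun kv => (kv.1, PySem.Set.ofList (PySem.Str.split₀ kv.2)))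
      = (data.items.map Prod.fst).filter (fun d => !(pvBoolOps.contains d)) := by
    exact (List.filter_map (f := Prod.fst) (p := fun d => !(pvBoolOps.contains d))
      (l := data.items)).symm
  rw [h]
  exact (hk.filter _)

lemma pvA_canon (collection2 : List (String × String)) :
    term_document_incidence_matrix collection2 = pvCanon (PySem.Dict.ofList collection2).items := by
  have hk := PySem.Dict.nodup_keys_ofList collection2
  simp only [term_document_incidence_matrix]
  rw [pvGetTerms_eq _ hk, pvUnique_eq_ofList]
  have hfresh := PySem.Dict.items_foldl_insert_fresh
    (l := PySem.Set.ofList (pvTerms (PySem.Dict.ofList collection2).items))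
    (k := fun t => t)
    (v := fun term => (pvGetDocCollectionTerms (PySem.Dict.ofList collection2)).items.foldl
        (fun vector c =>
          if ((pvGetDocCollectionTerms (PySem.Dict.ofList collection2)).getD c.1 []).contains term
          then vector ++ [(1 : Int)] else vector ++ [(0 : Int)]) [])
    (d := PySem.Dict.empty)
    (fun a _ => PySem.Dict.contains_empty _)
    (by simp)
  beta_reduce at hfresh
  rw [hfresh]
  simp only [show (PySem.Dict.empty : PySem.Dict String (List Int)).items = [] from rfl,
    List.nil_append]
  unfold pvCanon
  refine List.map_congr_left (fun term _ => ?_)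
  refine congrArg (fun r => (term, r)) ?_
  have hbody : (fun (vector : List Int) (c : String × List String) =>
        if ((pvGetDocCollectionTerms (PySem.Dict.ofList collection2)).getD c.1 []).contains term
        then vector ++ [(1 : Int)] else vector ++ [(0 : Int)])
      = (fun vector c => vector ++
          [if ((pvGetDocCollectionTerms (PySem.Dict.ofList collection2)).getD c.1 []).contains term
           then (1 : Int) else 0]) := by
    funext vector c
    cases ((pvGetDocCollectionTerms (PySem.Dict.ofList collection2)).getD c.1 []).contains term <;> simp
  rw [hbody, PySem.List.foldl_append_singleton_eq_map, List.nil_append,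
      pvDocsTerms_items _ hk, List.map_map]
  unfold pvRow
  refine List.map_congr_left (fun kv hkv => ?_)
  have hmem : (kv.1, PySem.Set.ofList (PySem.Str.split₀ kv.2))
      ∈ (pvGetDocCollectionTerms (PySem.Dict.ofList collection2)).items := by
    rw [pvDocsTerms_items _ hk]
    exact List.mem_map_of_mem hkv
  simp only [Function.comp_apply,
    PySem.Dict.getD_of_mem_items _ hmem (pvDocsTerms_keys_nodup _ hk)]
  simp [List.contains_eq_mem, PySem.Set.mem_ofList]

-- ---- B-side helpers ----
def pvDocsOf (data : PySem.Dict String String) : List String :=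
  data.keys.filter (fun d => !(pvBoolOps.contains d))

def pvPosOf (data : PySem.Dict String String) : PySem.Dict String Int :=
  (PySem.List.enumerate (pvDocsOf data)).foldl (fun d q => d.insert q.2 q.1) PySem.Dict.empty

lemma pvDocs_fold (data : PySem.Dict String String) :
    data.keys.foldl (fun acc doc => if pvBoolOps.contains doc then acc else acc ++ [doc]) []
      = pvDocsOf data := by
  have hbody : (fun (acc : List String) doc => if pvBoolOps.contains doc then acc else acc ++ [doc])
      = (fun acc doc => if !(pvBoolOps.contains doc) then acc ++ [doc] else acc) := by
    funext acc doc; cases pvBoolOps.contains doc <;> simp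
  rw [hbody, PySem.List.foldl_append_if_eq_filter, List.nil_append]; rfl

lemma pvDocsOf_eq_map (data : PySem.Dict String String) :
    pvDocsOf data = (data.items.filter pvP).map Prod.fst := by
  unfold pvDocsOf
  simp only [PySem.Dict.keys]
  exact List.filter_map (f := Prod.fst) (p := fun d => !(pvBoolOps.contains d)) (l := data.items)

lemma pvDocsOf_nodup (data : PySem.Dict String String) (hk : data.keys.Nodup) :
    (pvDocsOf data).Nodup := hk.filter _

lemma pvPos_items (data : PySem.Dict String String) (hk : data.keys.Nodup) :
    (pvPosOf data).items = (PySem.List.enumerate (pvDocsOf data)).map (fun q => (q.2, q.1)) := by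
  unfold pvPosOf
  have h := PySem.Dict.items_foldl_insert_fresh (PySem.List.enumerate (pvDocsOf data))
      (fun q => q.2) (fun q => q.1) PySem.Dict.empty
      (fun a _ => PySem.Dict.contains_empty _)
      (by rw [show List.map (fun (q : Int × String) => q.2) (PySem.List.enumerate (pvDocsOf data))
              = pvDocsOf data from PySem.List.map_snd_enumerate _ _]
          exact pvDocsOf_nodup data hk)
  beta_reduce at h
  rw [h]
  rfl

lemma pvPos_keys (data : PySem.Dict String String) (hk : data.keys.Nodup) :
    (pvPosOf data).keys = pvDocsOf data := by
  simp only [PySem.Dict.keys, pvPos_items data hk, List.map_map]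
  exact PySem.List.map_snd_enumerate _ 0

lemma pvPos_get_none (data : PySem.Dict String String) (hk : data.keys.Nodup)
    (x : String) (hx : x ∉ pvDocsOf data) : (pvPosOf data).get? x = none := by
  rw [PySem.Dict.get?_eq_none_iff_not_mem_keys, pvPos_keys data hk]; exact hx

lemma pvPos_get_some (data : PySem.Dict String String) (hk : data.keys.Nodup)
    (P : List (String × String)) (kv : String × String) (R : List (String × String))
    (hit : data.items = P ++ kv :: R) (hkv : pvP kv = true) :
    (pvPosOf data).get? kv.1 = some (((P.filter pvP).length : Nat) : Int) := by
  apply PySem.Dict.get?_of_mem_items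
  · rw [pvPos_items data hk]
    have hdocs : pvDocsOf data
        = (P.filter pvP).map Prod.fst ++ kv.1 :: (R.filter pvP).map Prod.fst := by
      rw [pvDocsOf_eq_map data, hit]; simp [hkv]
    have : ((((P.filter pvP).length : Nat) : Int), kv.1)
        ∈ PySem.List.enumerate (pvDocsOf data) := by
      rw [hdocs, PySem.List.enumerate_append, PySem.List.enumerate_cons]
      apply List.mem_append_right
      simp
    exact List.mem_map_of_mem this
  · rw [pvPos_keys data hk]; exact pvDocsOf_nodup data hk

-- items-shape bridge facts
lemma pvItems_keys {T : List String} {g : String → List Int} {m : PySem.Dict String (List Int)}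
    (h : m.items = T.map (fun t => (t, g t))) : m.keys = T := by
  simp only [PySem.Dict.keys, h, List.map_map]
  exact List.map_id' T

lemma pvItems_contains {T : List String} {g : String → List Int} {m : PySem.Dict String (List Int)}
    (h : m.items = T.map (fun t => (t, g t))) (x : String) : m.contains x = T.contains x := by
  rw [PySem.Dict.contains_eq_decide_mem_keys, pvItems_keys h, List.contains_eq_mem]

lemma pvItems_getD {T : List String} {g : String → List Int} {m : PySem.Dict String (List Int)}
    (h : m.items = T.map (fun t => (t, g t))) (hT : T.Nodup) {t : String} (ht : t ∈ T) :
    m.getD t [] = g t := by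
  refine PySem.Dict.getD_of_mem_items m ?_ ?_ []
  · rw [h]; exact List.mem_map_of_mem ht
  · rw [pvItems_keys h]; exact hT

lemma pvScatterTok_none (n : Nat) (m : PySem.Dict String (List Int)) (tok : String) :
    pvScatterTok n none m tok
      = if m.contains tok then m else m.insert tok (List.replicate n 0) := rfl

lemma pvScatterTok_some (n : Nat) (c : Int) (m : PySem.Dict String (List Int)) (tok : String) :
    pvScatterTok n (some c) m tok
      = (if m.contains tok then m else m.insert tok (List.replicate n 0)).insert tok
          (PySem.List.pySetD
            ((if m.contains tok then m else m.insert tok (List.replicate n 0)).getD tok []) c 1) := rfl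

-- the inner token loop of a document with no column (a boolean-operator key)
lemma pvInner_none (n : Nat) :
    ∀ (toks T : List String) (g : String → List Int) (m : PySem.Dict String (List Int)),
    m.items = T.map (fun t => (t, g t)) → T.Nodup →
    (toks.foldl (pvScatterTok n none) m).items
      = (PySem.Set.update T toks).map
          (fun t => (t, if T.contains t then g t else List.replicate n 0)) := by
  intro toks
  induction toks with
  | nil =>
    intro T g m h hT
    rw [List.foldl_nil, PySem.Set.update_nil, h]
    exact List.map_congr_left fun t ht => by simp [List.contains_eq_mem, ht]
  | cons tok rest ih =>
    intro T g m h hT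
    rw [List.foldl_cons]
    have hc : m.contains tok = T.contains tok := pvItems_contains h tok
    by_cases htok : tok ∈ T
    · have hct : T.contains tok = true := by simp [List.contains_eq_mem, htok]
      have hstep : pvScatterTok n none m tok = m := by
        rw [pvScatterTok_none, hc, hct, if_pos rfl]
      rw [hstep, ih T g m h hT, PySem.Set.update_cons,
          show PySem.Set.add T tok = T by simp [PySem.Set.add, PySem.Set.contains]; exact htok]
    · have hcf : T.contains tok = false := by simp [List.contains_eq_mem, htok]
      have hstep : pvScatterTok n none m tok = m.insert tok (List.replicate n 0) := by
        rw [pvScatterTok_none, hc, hcf, if_neg Bool.false_ne_true]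
      have hitems : (m.insert tok (List.replicate n 0)).items
          = (T ++ [tok]).map (fun t => (t, if t == tok then List.replicate n (0 : Int) else g t)) := by
        rw [PySem.Dict.items_insert_of_not_contains _ _ (by rw [hc]; exact hcf), h,
            List.map_append]
        congr 1
        · refine List.map_congr_left fun t ht => ?_
          have hne : t ≠ tok := fun e => htok (e ▸ ht)
          simp [hne]
        · simp
      have hnd : (T ++ [tok]).Nodup := by
        rw [List.nodup_append]
        refine ⟨hT, List.nodup_singleton _, fun a ha b hb => ?_⟩
        have hb' : b = tok := by simpa using hb
        exact fun he => htok ((he.trans hb') ▸ ha)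
      rw [hstep, ih _ _ _ hitems hnd, PySem.Set.update_cons,
          show PySem.Set.add T tok = T ++ [tok] by simp [PySem.Set.add, PySem.Set.contains]; exact htok]
      have hfun : (fun t => (t, if (T ++ [tok]).contains t
              then (if t == tok then List.replicate n (0 : Int) else g t)
              else List.replicate n 0))
          = fun t => (t, if T.contains t then g t else List.replicate n 0) := by
        funext t
        cases ht2 : t == tok
        · simp only [List.contains_append, List.contains_cons, ht2]
          cases T.contains t <;> simp
        · have : t = tok := eq_of_beq ht2
          subst this
          simp [htok]
      rw [hfun]

-- the inner token loop of a document in column c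
lemma pvInner_some (n c : Nat) :
    ∀ (toks T : List String) (g : String → List Int) (m : PySem.Dict String (List Int)),
    m.items = T.map (fun t => (t, g t)) → T.Nodup →
    (toks.foldl (pvScatterTok n (some (c : Int))) m).items
      = (PySem.Set.update T toks).map
          (fun t => (t, if toks.contains t
              then (if T.contains t then g t else List.replicate n 0).set c 1
              else g t)) := by
  intro toks
  induction toks with
  | nil =>
    intro T g m h hT
    rw [List.foldl_nil, PySem.Set.update_nil, h]
    simp
  | cons tok rest ih =>
    intro T g m h hT
    rw [List.foldl_cons]
    have hc : m.contains tok = T.contains tok := pvItems_contains h tok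
    by_cases htok : tok ∈ T
    · have hct : T.contains tok = true := by simp [List.contains_eq_mem, htok]
      have hgd : m.getD tok [] = g tok := pvItems_getD h hT htok
      have hstep : pvScatterTok n (some (c : Int)) m tok
          = m.insert tok ((g tok).set c 1) := by
        rw [pvScatterTok_some, hc, hct, if_pos rfl, hgd, PySem.List.pySetD_natCast]
      have hitems : (m.insert tok ((g tok).set c 1)).items
          = T.map (fun t => (t, if t == tok then (g tok).set c 1 else g t)) := by
        rw [PySem.Dict.items_insert_of_contains _ _ (by rw [hc]; exact hct), h, List.map_map]
        refine List.map_congr_left fun t _ => ?_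
        cases ht2 : t == tok
        · have hne : t ≠ tok := by simpa using ht2
          simp [hne]
        · have : t = tok := eq_of_beq ht2
          subst this; simp
      rw [hstep, ih _ _ _ hitems hT, PySem.Set.update_cons,
          show PySem.Set.add T tok = T by simp [PySem.Set.add, PySem.Set.contains]; exact htok]
      have hfun : (fun t => (t, if rest.contains t
              then (if T.contains t then (if t == tok then (g tok).set c 1 else g t)
                    else List.replicate n 0).set c 1
              else if t == tok then (g tok).set c 1 else g t))
          = fun t => (t, if (tok :: rest).contains t
              then (if T.contains t then g t else List.replicate n 0).set c 1
              else g t) := by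
        funext t
        cases ht2 : t == tok
        · have hne : t ≠ tok := by simpa using ht2
          simp [hne]
        · have : t = tok := eq_of_beq ht2
          subst this
          simp only [List.contains_cons, BEq.rfl, Bool.true_or, hct, if_true]
          cases rest.contains t <;> simp [List.set_set]
      rw [hfun]
    · have hcf : T.contains tok = false := by simp [List.contains_eq_mem, htok]
      have hstep : pvScatterTok n (some (c : Int)) m tok
          = (m.insert tok (List.replicate n 0)).insert tok ((List.replicate n (0 : Int)).set c 1) := by
        rw [pvScatterTok_some, hc, hcf, if_neg Bool.false_ne_true,
            PySem.Dict.getD_insert_self, PySem.List.pySetD_natCast]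
      have hitems : ((m.insert tok (List.replicate n 0)).insert tok
              ((List.replicate n (0 : Int)).set c 1)).items
          = (T ++ [tok]).map (fun t => (t, if t == tok
              then (List.replicate n (0 : Int)).set c 1 else g t)) := by
        rw [PySem.Dict.items_insert_of_contains _ _ (PySem.Dict.contains_insert_self _ _ _),
            PySem.Dict.items_insert_of_not_contains _ _ (by rw [hc]; exact hcf), h]
        simp only [List.map_append, List.map_map, List.map_cons, List.map_nil]
        congr 1
        · refine List.map_congr_left fun t ht => ?_
          have hne : t ≠ tok := fun e => htok (e ▸ ht)
          simp [hne]
        · simp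
      have hnd : (T ++ [tok]).Nodup := by
        rw [List.nodup_append]
        refine ⟨hT, List.nodup_singleton _, fun a ha b hb => ?_⟩
        have hb' : b = tok := by simpa using hb
        exact fun he => htok ((he.trans hb') ▸ ha)
      rw [hstep, ih _ _ _ hitems hnd, PySem.Set.update_cons,
          show PySem.Set.add T tok = T ++ [tok] by simp [PySem.Set.add, PySem.Set.contains]; exact htok]
      have hfun : (fun t => (t, if rest.contains t
              then (if (T ++ [tok]).contains t
                    then (if t == tok then (List.replicate n (0 : Int)).set c 1 else g t)
                    else List.replicate n 0).set c 1
              else if t == tok then (List.replicate n (0 : Int)).set c 1 else g t))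
          = fun t => (t, if (tok :: rest).contains t
              then (if T.contains t then g t else List.replicate n 0).set c 1
              else g t) := by
        funext t
        cases ht2 : t == tok
        · have hne : t ≠ tok := by simpa using ht2
          simp [hne]
        · have : t = tok := eq_of_beq ht2
          subst this
          simp only [List.contains_cons, BEq.rfl, Bool.true_or, List.contains_append,
            List.contains_nil, Bool.or_false, Bool.or_true, hcf, if_true]
          cases rest.contains t <;> simp [List.set_set]
      rw [hfun]

lemma pvRow_length (P : List (String × String)) (t : String) :
    (pvRow P t).length = (P.filter pvP).length := by
  unfold pvRow; simp

lemma pvRow_not_mem {P : List (String × String)} {t : String} (ht : t ∉ pvTerms P) :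
    pvRow P t = List.replicate (P.filter pvP).length 0 := by
  unfold pvRow
  rw [List.eq_replicate_iff]
  refine ⟨by simp, fun b hb => ?_⟩
  obtain ⟨kv, hkv, hbeq⟩ := List.mem_map.mp hb
  have : ¬ (PySem.Str.split₀ kv.2).contains t := by
    intro hcont
    exact ht (List.mem_flatMap.mpr ⟨kv, List.mem_of_mem_filter hkv,
      by simpa [List.contains_eq_mem] using hcont⟩)
  simp only [Bool.not_eq_true] at this
  rw [this] at hbeq
  simpa using hbeq.symm

-- the outer loop invariant: after processing the prefix P, the matrix holds the
-- first-occurrence-ordered terms of P, each with its row over P's non-boolean docs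
-- padded with zeros to the full width
lemma pvScatterInv (data : PySem.Dict String String) (hk : data.keys.Nodup) :
    ∀ (R P : List (String × String)) (m : PySem.Dict String (List Int)),
    data.items = P ++ R →
    m.items = (PySem.Set.ofList (pvTerms P)).map
        (fun t => (t, pvRow P t
          ++ List.replicate ((pvDocsOf data).length - (P.filter pvP).length) 0)) →
    (R.foldl (pvScatterDoc (pvDocsOf data).length (pvPosOf data)) m).items
      = (PySem.Set.ofList (pvTerms (P ++ R))).map
          (fun t => (t, pvRow (P ++ R) t
            ++ List.replicate ((pvDocsOf data).length - ((P ++ R).filter pvP).length) 0)) := by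
  intro R
  induction R with
  | nil => intro P m _ hm; simpa using hm
  | cons kv R ih =>
    intro P m hit hm
    rw [List.foldl_cons]
    have hnd := PySem.Set.nodup_ofList (pvTerms P)
    have hterms : pvTerms (P ++ [kv]) = pvTerms P ++ PySem.Str.split₀ kv.2 := by
      unfold pvTerms; simp
    have hlen_n : (pvDocsOf data).length = (data.items.filter pvP).length := by
      rw [pvDocsOf_eq_map data, List.length_map]
    by_cases hkv : pvP kv = true
    · -- a non-boolean document: column (P.filter pvP).length gets written
      have hcol := pvPos_get_some data hk P kv R hit hkv
      have hstep : pvScatterDoc (pvDocsOf data).length (pvPosOf data) m kv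
          = (PySem.Str.split₀ kv.2).foldl
              (pvScatterTok (pvDocsOf data).length (some (((P.filter pvP).length : Nat) : Int))) m := by
        simp [pvScatterDoc, hcol]
      have hle : (P.filter pvP).length + 1 ≤ (pvDocsOf data).length := by
        have h1 : (List.filter pvP (kv :: R)).length = (List.filter pvP R).length + 1 := by
          simp [hkv]
        rw [hlen_n, hit, List.filter_append, List.length_append, h1]
        omega
      have hfilter : (P ++ [kv]).filter pvP = P.filter pvP ++ [kv] := by
        simp [List.filter_append, hkv]
      have hm' : ((PySem.Str.split₀ kv.2).foldl
            (pvScatterTok (pvDocsOf data).length (some (((P.filter pvP).length : Nat) : Int))) m).items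
          = (PySem.Set.ofList (pvTerms (P ++ [kv]))).map
              (fun t => (t, pvRow (P ++ [kv]) t
                ++ List.replicate ((pvDocsOf data).length - ((P ++ [kv]).filter pvP).length) 0)) := by
        rw [pvInner_some _ _ _ _ _ _ hm hnd, hterms, PySem.Set.ofList_append]
        refine List.map_congr_left fun t _ => ?_
        refine congrArg (fun r => (t, r)) ?_
        have hrow : pvRow (P ++ [kv]) t
            = pvRow P t ++ [if (PySem.Str.split₀ kv.2).contains t then 1 else 0] := by
          unfold pvRow; rw [hfilter]; simp
        rw [hrow, hfilter]
        simp only [List.length_append, List.length_cons, List.length_nil, Nat.zero_add]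
        have hlen1 : (List.replicate ((pvDocsOf data).length - (P.filter pvP).length) (0 : Int))
            = 0 :: List.replicate ((pvDocsOf data).length - ((P.filter pvP).length + 1)) 0 := by
          rw [show (pvDocsOf data).length - (P.filter pvP).length
              = ((pvDocsOf data).length - ((P.filter pvP).length + 1)) + 1 by omega]
          rfl
        cases hc1 : (PySem.Str.split₀ kv.2).contains t
        · rw [if_neg Bool.false_ne_true, if_neg Bool.false_ne_true, hlen1]
          simp
        · rw [if_pos rfl, if_pos rfl]
          cases hTt : List.contains (PySem.Set.ofList (pvTerms P)) t
          · have htP : t ∉ pvTerms P := fun hmem => by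
              simp [List.contains_eq_mem, PySem.Set.mem_ofList, hmem] at hTt
            rw [if_neg Bool.false_ne_true]
            rw [pvRow_not_mem htP]
            rw [show (List.replicate ((pvDocsOf data).length) (0 : Int))
                = List.replicate (P.filter pvP).length 0
                  ++ List.replicate ((pvDocsOf data).length - (P.filter pvP).length) 0 by
              rw [← List.replicate_add]
              congr 1
              omega]
            rw [List.set_append, if_neg (by simp), List.length_replicate, Nat.sub_self,
                hlen1]
            simp
          · rw [if_pos rfl]
            rw [List.set_append, if_neg (by rw [pvRow_length]; omega), pvRow_length,
                Nat.sub_self, hlen1]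
            simp
      rw [hstep]
      have := ih (P ++ [kv])
          ((PySem.Str.split₀ kv.2).foldl
            (pvScatterTok (pvDocsOf data).length (some (((P.filter pvP).length : Nat) : Int))) m)
          (by rw [hit]; simp) hm'
      simpa using this
    · -- a boolean-operator key: no column, only fresh all-zero rows appear
      have hkvf : pvP kv = false := by simpa using hkv
      have hcol : (pvPosOf data).get? kv.1 = none := by
        apply pvPos_get_none data hk
        intro hmem
        have h2 := List.of_mem_filter hmem
        unfold pvP at hkvf
        simp only at h2
        rw [hkvf] at h2
        exact Bool.false_ne_true h2
      have hstep : pvScatterDoc (pvDocsOf data).length (pvPosOf data) m kv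
          = (PySem.Str.split₀ kv.2).foldl
              (pvScatterTok (pvDocsOf data).length none) m := by
        simp [pvScatterDoc, hcol]
      have hfilter : (P ++ [kv]).filter pvP = P.filter pvP := by
        simp [List.filter_append, hkvf]
      have hle : (P.filter pvP).length ≤ (pvDocsOf data).length := by
        rw [hlen_n, hit, List.filter_append, List.length_append]
        omega
      have hm' : ((PySem.Str.split₀ kv.2).foldl
            (pvScatterTok (pvDocsOf data).length none) m).items
          = (PySem.Set.ofList (pvTerms (P ++ [kv]))).map
              (fun t => (t, pvRow (P ++ [kv]) t
                ++ List.replicate ((pvDocsOf data).length - ((P ++ [kv]).filter pvP).length) 0)) := by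
        rw [pvInner_none _ _ _ _ _ hm hnd, hterms, PySem.Set.ofList_append]
        refine List.map_congr_left fun t _ => ?_
        refine congrArg (fun r => (t, r)) ?_
        have hrow : pvRow (P ++ [kv]) t = pvRow P t := by
          unfold pvRow; rw [hfilter]
        rw [hrow, hfilter]
        cases hTt : List.contains (PySem.Set.ofList (pvTerms P)) t
        · have htP : t ∉ pvTerms P := fun hmem => by
            simp [List.contains_eq_mem, PySem.Set.mem_ofList, hmem] at hTt
          rw [if_neg Bool.false_ne_true]
          rw [pvRow_not_mem htP, ← List.replicate_add]
          congr 1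
          omega
        · rw [if_pos rfl]
      rw [hstep]
      have := ih (P ++ [kv])
          ((PySem.Str.split₀ kv.2).foldl (pvScatterTok (pvDocsOf data).length none) m)
          (by rw [hit]; simp) hm'
      simpa using this

lemma pvB_canon (collection2 : List (String × String)) :
    term_document_incidence_matrix_alt collection2 = pvCanon (PySem.Dict.ofList collection2).items := by
  have hk := PySem.Dict.nodup_keys_ofList collection2
  simp only [term_document_incidence_matrix_alt]
  rw [pvDocs_fold]
  rw [show (PySem.List.enumerate (pvDocsOf (PySem.Dict.ofList collection2))).foldl
        (fun d q => d.insert q.2 q.1) (PySem.Dict.empty : PySem.Dict String Int)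
      = pvPosOf (PySem.Dict.ofList collection2) from rfl]
  have hinv := pvScatterInv (PySem.Dict.ofList collection2) hk
      (PySem.Dict.ofList collection2).items [] PySem.Dict.empty (by simp)
      (by rfl)
  simp only [List.nil_append] at hinv
  rw [hinv]
  unfold pvCanon
  refine List.map_congr_left fun t _ => ?_
  rw [show (pvDocsOf (PySem.Dict.ofList collection2)).length
      - ((PySem.Dict.ofList collection2).items.filter pvP).length = 0 by
    rw [pvDocsOf_eq_map, List.length_map]
    exact Nat.sub_self _]
  simp

-- ===== VERDICT (by name: the statement is the Claim_ definition above) =====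
theorem term_document_incidence_matrix_spec : Claim_equal_term_document_incidence_matrix := by
  intro c _
  unfold Spec_term_document_incidence_matrix
  rw [pvA_canon, pvB_canon]
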